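-- pv_equiv track=rewrite | github.com/masaakikubota/AnyAIInsightAgent | external/AnyAI_video_analysis/src/server.py | _build_kol_prompt
-- ===== SOURCE A (Python) =====
-- def _build_kol_prompt(prompt_template: str, kol_context: str, reactions: list[str], output_language: str) -> str:
--     template = prompt_template.replace("{{OUTPUT_LANGUAGE}}", output_language)
--     cleaned_context = (kol_context or "").strip()
--
--     trimmed_reactions = []
--     running_chars = 0
--     max_items = 20
--     max_total_chars = 4000
--     for reaction in reactions:
--         if len(trimmed_reactions) >= max_items:
--             break
--         text = (reaction or "").strip()
--         if not text:
--             continue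
--         snippet = text[:500]
--         projected = running_chars + len(snippet)
--         if projected > max_total_chars:
--             break
--         trimmed_reactions.append(snippet)
--         running_chars = projected
--
--     if not trimmed_reactions:
--         reactions_block = "(No audience reactions provided)"
--     else:
--         reactions_block = "\n".join(f"- {c}" for c in trimmed_reactions)
--
--     return f'''
-- {template}
--
-- KOL_CONTEXT: """{cleaned_context}"""
-- REACTIONS:\n{reactions_block}
-- '''.strip()
-- ===== SOURCE B (Python) =====
-- def _take_budget(items, budget):
--     # longest prefix whose cumulative length stays within budget (first overflow stops)
--     if not items or len(items[0]) > budget: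
--         return []
--     return [items[0]] + _take_budget(items[1:], budget - len(items[0]))
--
--
-- def _build_kol_prompt(prompt_template: str, kol_context: str, reactions: list[str], output_language: str) -> str:
--     template = prompt_template.replace("{{OUTPUT_LANGUAGE}}", output_language)
--     cleaned_context = (kol_context or "").strip()
--
--     cleaned = [r.strip()[:500] for r in reactions if r.strip()][:20]
--     selected = _take_budget(cleaned, 4000)
--
--     reactions_block = (
--         "\n".join("- " + c for c in selected)
--         if selected
--         else "(No audience reactions provided)"
--     )
--
--     return f'''
-- {template}
--
-- KOL_CONTEXT: """{cleaned_context}"""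
-- REACTIONS:\n{reactions_block}
-- '''.strip()
-- ===== Notes on version B (the rewrite author's own statement) =====
-- stated objective: alternative
-- what changed: Replaces A's single loop with break/continue and running-length state by a pipeline: a comprehension that strips/truncates and drops empties, a [:20] cap, and a recursive budget helper that keeps the longest prefix whose cumulative length stays within 4000 chars.
import Mathlib
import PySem

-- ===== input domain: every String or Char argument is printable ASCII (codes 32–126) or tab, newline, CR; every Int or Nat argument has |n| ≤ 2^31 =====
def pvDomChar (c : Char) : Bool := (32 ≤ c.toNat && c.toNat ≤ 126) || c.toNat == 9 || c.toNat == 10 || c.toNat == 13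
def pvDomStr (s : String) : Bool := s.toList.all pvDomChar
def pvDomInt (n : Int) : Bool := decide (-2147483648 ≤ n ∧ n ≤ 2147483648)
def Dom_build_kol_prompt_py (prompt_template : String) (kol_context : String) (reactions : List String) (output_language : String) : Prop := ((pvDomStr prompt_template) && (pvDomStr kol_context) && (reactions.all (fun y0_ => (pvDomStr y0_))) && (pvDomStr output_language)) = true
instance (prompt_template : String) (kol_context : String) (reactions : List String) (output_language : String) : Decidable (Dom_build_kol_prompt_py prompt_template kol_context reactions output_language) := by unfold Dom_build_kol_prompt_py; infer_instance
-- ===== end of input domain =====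

-- B rebuilds the prompt by a different decomposition (filter/truncate comprehension, cap 20, then a
-- recursive character-budget prefix) instead of A's single loop with break/continue; objective: alternative.

-- ===== PORT A =====
-- A's for-loop with break/continue, as structural recursion over reactions with the same state.
def pvALoop : List String → List String → Int → List String
  | [], trimmed, _ => trimmed
  | r :: rs, trimmed, running =>
    if trimmed.length ≥ 20 then trimmed
    else
      let text := PySem.Str.strip r
      if text = "" then pvALoop rs trimmed running
      else
        let snippet := PySem.Str.slice text none (some 500)
        let projected := running + (PySem.Str.len snippet : Int)
        if projected > 4000 then trimmed
        else pvALoop rs (trimmed ++ [snippet]) projected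

def build_kol_prompt_py (prompt_template : String) (kol_context : String) (reactions : List String) (output_language : String) : String :=
  let template := PySem.Str.replace prompt_template "{{OUTPUT_LANGUAGE}}" output_language
  let cleaned_context := PySem.Str.strip kol_context
  let trimmed_reactions := pvALoop reactions [] 0
  let reactions_block :=
    if trimmed_reactions = [] then "(No audience reactions provided)"
    else PySem.Str.join "\n" (trimmed_reactions.map (fun c => PySem.Str.join "" ["- ", c]))
  PySem.Str.strip (PySem.Str.join "" ["\n", template, "\n\nKOL_CONTEXT: \"\"\"", cleaned_context, "\"\"\"\nREACTIONS:\n", reactions_block, "\n"])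

-- ===== PORT B =====
-- B's recursive budget helper: longest prefix whose cumulative length stays within budget.
def pvTakeBudget : List String → Int → List String
  | [], _ => []
  | s :: rest, budget =>
    if (PySem.Str.len s : Int) > budget then []
    else s :: pvTakeBudget rest (budget - (PySem.Str.len s : Int))

def build_kol_prompt_py_alt (prompt_template : String) (kol_context : String) (reactions : List String) (output_language : String) : String :=
  let template := PySem.Str.replace prompt_template "{{OUTPUT_LANGUAGE}}" output_language
  let cleaned_context := PySem.Str.strip kol_context
  let cleaned := PySem.List.slice ((reactions.filter (fun r => PySem.Str.strip r ≠ "")).map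
      (fun r => PySem.Str.slice (PySem.Str.strip r) none (some 500))) none (some 20)
  let selected := pvTakeBudget cleaned 4000
  let reactions_block :=
    if selected = [] then "(No audience reactions provided)"
    else PySem.Str.join "\n" (selected.map (fun c => PySem.Str.join "" ["- ", c]))
  PySem.Str.strip (PySem.Str.join "" ["\n", template, "\n\nKOL_CONTEXT: \"\"\"", cleaned_context, "\"\"\"\nREACTIONS:\n", reactions_block, "\n"])

-- ===== PRECONDITION & SPEC =====
def Spec_build_kol_prompt_py (prompt_template : String) (kol_context : String) (reactions : List String) (output_language : String) (out : String) : Prop := out = build_kol_prompt_py_alt prompt_template kol_context reactions output_language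
instance (prompt_template : String) (kol_context : String) (reactions : List String) (output_language : String) (out : String) : Decidable (Spec_build_kol_prompt_py prompt_template kol_context reactions output_language out) := by unfold Spec_build_kol_prompt_py; infer_instance

-- ===== CLAIM (what is proved, stated in full; the proofs are below) =====
def Claim_equal_build_kol_prompt_py : Prop := ∀ (prompt_template : String) (kol_context : String) (reactions : List String) (output_language : String), Dom_build_kol_prompt_py prompt_template kol_context reactions output_language → Spec_build_kol_prompt_py prompt_template kol_context reactions output_language (build_kol_prompt_py prompt_template kol_context reactions output_language)

-- ===== LEMMAS AND PROOFS =====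

lemma pvTakeBudget_cons (s : String) (rest : List String) (budget : Int) :
    pvTakeBudget (s :: rest) budget =
      if (PySem.Str.len s : Int) > budget then []
      else s :: pvTakeBudget rest (budget - (PySem.Str.len s : Int)) := rfl

-- A's interleaved loop equals B's pipeline: filter+truncate (clean), cap at (20 - |trimmed|), budget (4000 - running).
lemma pvALoop_eq (rs : List String) : ∀ (trimmed : List String) (running : Int),
    trimmed.length ≤ 20 →
    pvALoop rs trimmed running =
      trimmed ++ pvTakeBudget
        (((rs.filter (fun r => PySem.Str.strip r ≠ "")).map
          (fun r => PySem.Str.slice (PySem.Str.strip r) none (some 500))).take (20 - trimmed.length))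
        (4000 - running) := by
  induction rs with
  | nil => intro trimmed running _; simp [pvALoop, pvTakeBudget]
  | cons r rs ih =>
    intro trimmed running hlen
    by_cases h20 : trimmed.length ≥ 20
    · have : trimmed.length = 20 := le_antisymm hlen h20
      simp [pvALoop, this, pvTakeBudget]
    · push Not at h20
      by_cases hempty : PySem.Str.strip r = ""
      · simp only [pvALoop, if_neg (by omega : ¬ trimmed.length ≥ 20), if_pos hempty]
        rw [ih trimmed running hlen]
        simp [hempty]
      · have htake : 20 - trimmed.length = (20 - (trimmed.length + 1)) + 1 := by omega
        simp only [pvALoop, if_neg (by omega : ¬ trimmed.length ≥ 20), if_neg hempty,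
          List.filter_cons]
        simp only [hempty, decide_not, decide_false, Bool.not_false, if_true, List.map_cons]
        rw [htake, List.take_succ_cons]
        by_cases hover : running + (PySem.Str.len (PySem.Str.slice (PySem.Str.strip r) none (some 500)) : Int) > 4000
        · rw [if_pos hover, pvTakeBudget_cons, if_pos (by omega)]
          simp
        · rw [if_neg hover, pvTakeBudget_cons,
            if_neg (by omega : ¬ ((PySem.Str.len (PySem.Str.slice (PySem.Str.strip r) none (some 500)) : Int) > 4000 - running))]
          rw [ih (trimmed ++ [PySem.Str.slice (PySem.Str.strip r) none (some 500)])
            (running + (PySem.Str.len (PySem.Str.slice (PySem.Str.strip r) none (some 500)) : Int))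
            (by simp; omega)]
          simp only [List.length_append, List.length_cons, List.length_nil]
          rw [List.append_assoc]
          simp only [sub_add_eq_sub_sub]
          simp [decide_not]

lemma pvLists_eq (reactions : List String) :
    pvALoop reactions [] 0 =
      pvTakeBudget (PySem.List.slice ((reactions.filter (fun r => PySem.Str.strip r ≠ "")).map
        (fun r => PySem.Str.slice (PySem.Str.strip r) none (some 500))) none (some 20)) 4000 := by
  rw [pvALoop_eq reactions [] 0 (by simp)]
  rw [show ((20:Int)) = ((20:Nat):Int) by norm_num, PySem.List.slice_to_natCast]
  simp

-- ===== VERDICT (by name: the statement is the Claim_ definition above) =====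
theorem build_kol_prompt_py_spec : Claim_equal_build_kol_prompt_py := by
  intro prompt_template kol_context reactions output_language _
  unfold Spec_build_kol_prompt_py build_kol_prompt_py build_kol_prompt_py_alt
  rw [pvLists_eq reactions]
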